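-- pv_equiv track=rewrite | github.com/phi-comps/py-util | enuming.py | all_signs
-- ===== SOURCE A (Python) =====
-- def all_signs(tup):
--     """all possible sign combinations of the given tuple"""
--     if len(tup) == 0:
--         yield ()
--     else:
--         head = tup[0]
--         tail = tup[1:]
--         for t in all_signs(tail):
--             yield (head,) + t
--             if head != 0:
--                 yield (-head,) + t
-- ===== SOURCE B (Python) =====
-- def all_signs(tup):
--     """all possible sign combinations of the given tuple"""
--     results = [()]
--     for head in reversed(tup):
--         signs = (head,) if head == 0 else (head, -head)
--         results = [(s,) + t for t in results for s in signs]
--     yield from results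
-- ===== Notes on version B (the rewrite author's own statement) =====
-- stated objective: alternative
-- what changed: Replaces the recursive generator with an iterative accumulator: start from [()] and, scanning the tuple last-to-first, prepend each sign variant via a comprehension.
import Mathlib
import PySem

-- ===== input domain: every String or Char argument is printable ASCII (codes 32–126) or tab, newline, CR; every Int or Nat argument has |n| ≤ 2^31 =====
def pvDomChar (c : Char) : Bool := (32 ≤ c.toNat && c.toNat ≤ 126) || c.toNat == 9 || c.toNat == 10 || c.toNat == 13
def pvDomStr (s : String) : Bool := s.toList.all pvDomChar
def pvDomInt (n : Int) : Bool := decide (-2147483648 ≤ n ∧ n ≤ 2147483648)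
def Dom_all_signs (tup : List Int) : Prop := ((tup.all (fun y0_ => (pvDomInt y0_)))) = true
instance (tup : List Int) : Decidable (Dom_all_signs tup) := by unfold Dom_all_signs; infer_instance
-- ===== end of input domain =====

-- B replaces A's recursive generator with an iterative accumulator over the reversed tuple (alternative decomposition, same cost).

-- ===== PORT A =====
-- A: recursive generator; for each sign combination t of the tail, yield head::t and, if head ≠ 0, (-head)::t.
def all_signs (tup : List Int) : List (List Int) :=
  match tup with
  | [] => [[]]
  | head :: tail =>
      (all_signs tail).flatMap (fun t =>
        [head :: t] ++ (if head ≠ 0 then [(-head) :: t] else []))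

-- ===== PORT B =====
-- B: results = [()]; for head in reversed(tup): results = [(s,)+t for t in results for s in signs].
def all_signs_alt (tup : List Int) : List (List Int) :=
  tup.reverse.foldl (fun results head =>
    let signs : List Int := if head == 0 then [head] else [head, -head]
    results.flatMap (fun t => signs.map (fun s => s :: t))) [[]]

-- ===== PRECONDITION & SPEC =====
def Spec_all_signs (tup : List Int) (out : List (List Int)) : Prop := out = all_signs_alt tup
instance (tup : List Int) (out : List (List Int)) : Decidable (Spec_all_signs tup out) := by unfold Spec_all_signs; infer_instance

-- ===== CLAIM (what is proved, stated in full; the proofs are below) =====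
def Claim_equal_all_signs : Prop := ∀ (tup : List Int), Dom_all_signs tup → Spec_all_signs tup (all_signs tup)

-- ===== LEMMAS AND PROOFS =====
theorem all_signs_alt_eq_foldr (tup : List Int) :
    all_signs_alt tup =
      tup.foldr (fun head results =>
        (results.flatMap (fun t =>
          (if head == 0 then [head] else [head, -head]).map (fun s => s :: t)))) [[]] := by
  simp [all_signs_alt, List.foldl_reverse]

theorem all_signs_eq_alt (tup : List Int) : all_signs tup = all_signs_alt tup := by
  rw [all_signs_alt_eq_foldr]
  induction tup with
  | nil => simp [all_signs]
  | cons head tail ih =>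
      simp only [all_signs, List.foldr_cons, ih]
      apply List.flatMap_congr
      intro t _
      by_cases h : head = 0 <;> simp [h]

-- ===== VERDICT (by name: the statement is the Claim_ definition above) =====
theorem all_signs_spec : Claim_equal_all_signs := by
  intro tup _
  unfold Spec_all_signs
  exact all_signs_eq_alt tup
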